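-- pv_equiv track=rewrite | github.com/Brxnni/AoC-2024 | 07/day07.py | part2
-- ===== SOURCE A (Python) =====
-- def part2(n):
-- 	count = 0
-- 	def check(res, nums):
-- 		if len(nums) == 1:
-- 			return nums[0] == res
--
-- 		# + operator
-- 		if check(res - nums[-1], nums[:-1]):
-- 			return True
-- 		# * operator
-- 		if res % nums[-1] == 0:
-- 			if check(int(res / nums[-1]), nums[:-1]): return True
-- 		# || operator
-- 		if str(res).endswith(str(nums[-1])):
-- 			try:
-- 				if check(int(str(res)[:-len(str(nums[-1]))]), nums[:-1]): return True
-- 			except: ...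
--
-- 		return False
--
-- 	for line in n:
-- 		if check(*line): count += line[0]
-- 	return count
-- ===== SOURCE B (Python) =====
-- def part2(n):
-- 	total = 0
-- 	for res, nums in n:
-- 		# peel operators off the right end, breadth-first over a set of residual targets
-- 		vals = {res}
-- 		for l in reversed(nums[1:]):
-- 			sl = str(l)
-- 			nxt = set()
-- 			for r in vals:
-- 				nxt.add(r - l)
-- 				if l != 0 and r % l == 0:
-- 					nxt.add(r // l)
-- 				sr = str(r)
-- 				if sr.endswith(sl):
-- 					try:
-- 						nxt.add(int(sr[:-len(sl)]))
-- 					except ValueError: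
-- 						pass
-- 			vals = nxt
-- 		if nums[0] in vals:
-- 			total += res
-- 	return total
-- ===== Notes on version B (the rewrite author's own statement) =====
-- stated objective: alternative
-- what changed: A's per-line short-circuiting recursive DFS over operator choices is replaced by an iterative breadth-first pass that peels numbers off the right end while maintaining a deduplicated set of residual target values, then tests membership of the first number; B matches A on every input where A returns, including lines with zeros.
-- outside the precondition, e.g. on part2([(5, [5, 0])]): A returns 5, B returns 5; on part2([(50, [5, 0])]): A raises ZeroDivisionError, B returns 50; on part2([(0, [])]): A raises IndexError, B raises IndexError
import Mathlib
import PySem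

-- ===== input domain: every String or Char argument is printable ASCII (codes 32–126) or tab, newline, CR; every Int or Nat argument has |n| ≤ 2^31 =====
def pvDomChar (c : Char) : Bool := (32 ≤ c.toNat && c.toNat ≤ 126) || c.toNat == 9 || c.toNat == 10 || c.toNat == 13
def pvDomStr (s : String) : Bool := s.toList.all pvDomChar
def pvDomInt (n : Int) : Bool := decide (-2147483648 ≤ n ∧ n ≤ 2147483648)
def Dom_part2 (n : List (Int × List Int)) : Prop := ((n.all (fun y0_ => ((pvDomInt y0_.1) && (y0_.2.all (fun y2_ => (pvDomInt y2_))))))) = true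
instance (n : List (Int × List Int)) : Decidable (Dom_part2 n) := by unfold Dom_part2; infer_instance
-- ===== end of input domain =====

-- B replaces A's per-line recursive DFS by a breadth-first set of residual targets peeled off the
-- right end of the number list (objective: alternative decomposition, same worst-case cost).

-- ===== PORT A =====
-- A's inner recursive `check(res, nums)`.  `int(res / nums[-1])` (float division) is ported as
-- PySem.Int.truncdiv, exact for the magnitudes the stated domain produces.
def checkA (res : Int) (nums : List Int) : Bool :=
  if nums.length = 1 then
    -- nums[0] == res  (index 0 is in range: length = 1)
    PySem.List.pyGetD nums 0 0 == res
  else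
    match _h : PySem.List.pyGet? nums (-1) with
    | none => false   -- nums[-1] raises IndexError (nums = []); excluded by Pre_part2
    | some last =>
      let rest := PySem.List.slice nums none (some (-1))    -- nums[:-1]
      if checkA (res - last) rest then true
      -- res % nums[-1] == 0  (nums[-1] = 0 raises ZeroDivisionError; excluded by Pre_part2)
      else if (PySem.Int.mod res last == 0) && checkA (PySem.Int.truncdiv res last) rest then true
      else
        -- str(res).endswith(str(nums[-1]))
        if PySem.Chars.endswith (PySem.Int.toChars res) (PySem.Int.toChars last) then
          -- int(str(res)[:-len(str(nums[-1]))]); `except: ...` swallows the ValueError (none)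
          match PySem.Int.ofChars? (PySem.Chars.slice (PySem.Int.toChars res) none
              (some (-(PySem.Chars.len (PySem.Int.toChars last) : Int)))) with
          | some v => checkA v rest
          | none => false
        else false
termination_by nums.length
decreasing_by
  all_goals
    have hne : nums ≠ [] := by
      rintro rfl; simp [PySem.List.pyGet?] at _h
    have h1 : nums.length ≠ 0 := by simpa using hne
    rw [PySem.List.slice_to_neg_one]
    have := @List.length_dropLast _ nums
    omega

def part2 (n : List (Int × List Int)) : Int :=
  n.foldl (fun count line => if checkA line.1 line.2 then count + line.1 else count) 0

-- ===== PORT B =====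
-- body of B's inner `for r in vals` loop: add every residual that one operator peel can produce
def succB (l : Int) (nxt : PySem.Set Int) (r : Int) : PySem.Set Int :=
  let nxt := PySem.Set.add nxt (r - l)
  let nxt := if l != 0 && PySem.Int.mod r l == 0 then PySem.Set.add nxt (PySem.Int.floordiv r l) else nxt
  if PySem.Chars.endswith (PySem.Int.toChars r) (PySem.Int.toChars l) then
    match PySem.Int.ofChars? (PySem.Chars.slice (PySem.Int.toChars r) none
        (some (-(PySem.Chars.len (PySem.Int.toChars l) : Int)))) with
    | some v => PySem.Set.add nxt v
    | none => nxt    -- int('') / int('-') raises ValueError, swallowed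
  else nxt

def checkB (res : Int) (nums : List Int) : Bool :=
  -- for l in reversed(nums[1:]): vals = {successors of every r in vals}
  let vals := ((PySem.List.slice nums (some 1) none).reverse).foldl
    (fun vals l => vals.foldl (fun nxt r => succB l nxt r) (PySem.Set.ofList ([] : List Int)))
    (PySem.Set.ofList [res])
  -- nums[0] in vals   (nums[0] raises IndexError on an empty list; excluded by Pre_part2)
  match PySem.List.pyGet? nums 0 with
  | some h0 => PySem.Set.contains vals h0
  | none => false

def part2_alt (n : List (Int × List Int)) : Int :=
  n.foldl (fun total line => if checkB line.1 line.2 then total + line.1 else total) 0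

-- ===== PRECONDITION & SPEC =====
-- Pre_ excludes lines with an empty number list (A raises IndexError) and lines with a 0 after the
-- first number: there A raises ZeroDivisionError exactly when its subtraction-first search fails, a
-- run-dependent subset with no closed form, so the whole region is excluded; B returns on all of it
-- and agrees with A wherever A returns (see cites).
def Pre_part2 (n : List (Int × List Int)) : Prop :=
  ∀ p ∈ n, p.2 ≠ [] ∧ (0 : Int) ∉ p.2.tail
instance (n : List (Int × List Int)) : Decidable (Pre_part2 n) := by unfold Pre_part2; infer_instance

def pvWitness_part2 : (List (Int × List Int)) := [(29, [2, 9]), (6, [2, 3]), (5, [4, 2])]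

def Spec_part2 (n : List (Int × List Int)) (out : Int) : Prop := out = part2_alt n
instance (n : List (Int × List Int)) (out : Int) : Decidable (Spec_part2 n out) := by unfold Spec_part2; infer_instance

-- ===== CLAIM (what is proved, stated in full; the proofs are below) =====
def Claim_equal_part2 : Prop := ∀ (n : List (Int × List Int)), Dom_part2 n → Pre_part2 n → Spec_part2 n (part2 n)

-- ===== LEMMAS AND PROOFS =====

-- the three residuals one peel of `l` can leave, as a predicate
def SuccP (l r x : Int) : Prop :=
  x = r - l ∨
  (l ≠ 0 ∧ PySem.Int.mod r l = 0 ∧ x = PySem.Int.floordiv r l) ∨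
  (PySem.Chars.endswith (PySem.Int.toChars r) (PySem.Int.toChars l) = true ∧
    PySem.Int.ofChars? (PySem.Chars.slice (PySem.Int.toChars r) none
      (some (-(PySem.Chars.len (PySem.Int.toChars l) : Int)))) = some x)

def stepB (vals : PySem.Set Int) (l : Int) : PySem.Set Int :=
  vals.foldl (succB l) (PySem.Set.ofList ([] : List Int))

def runB (S : PySem.Set Int) (t : List Int) : PySem.Set Int := t.foldl stepB S

lemma ofList_singleton (r : Int) : PySem.Set.ofList [r] = [r] := by
  simp [PySem.Set.ofList, PySem.Set.add, PySem.Set.empty]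

set_option maxHeartbeats 1000000 in
lemma mem_succB (l r x : Int) (acc : PySem.Set Int) :
    x ∈ succB l acc r ↔ x ∈ acc ∨ SuccP l r x := by
  unfold succB SuccP
  rcases eq_or_ne l 0 with rfl | hz0
  · by_cases he : PySem.Chars.endswith (PySem.Int.toChars r) (PySem.Int.toChars 0) = true <;>
    cases ho : PySem.Int.ofChars? (PySem.Chars.slice (PySem.Int.toChars r) none
        (some (-(PySem.Chars.len (PySem.Int.toChars 0) : Int)))) <;>
    simp [PySem.Set.mem_add, he, ho] <;>
    constructor <;> intro h <;> tauto
  · by_cases hm : PySem.Int.mod r l = 0 <;>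
    by_cases he : PySem.Chars.endswith (PySem.Int.toChars r) (PySem.Int.toChars l) = true <;>
    cases ho : PySem.Int.ofChars? (PySem.Chars.slice (PySem.Int.toChars r) none
        (some (-(PySem.Chars.len (PySem.Int.toChars l) : Int)))) <;>
    simp [PySem.Set.mem_add, hz0, hm, he, ho] <;>
    constructor <;> intro h <;> tauto

lemma mem_foldl_succB (l x : Int) :
    ∀ (rs : List Int) (acc : PySem.Set Int),
      x ∈ rs.foldl (succB l) acc ↔ x ∈ acc ∨ ∃ r ∈ rs, SuccP l r x := by
  intro rs
  induction rs with
  | nil => intro acc; simp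
  | cons r rs ih =>
      intro acc
      simp only [List.foldl_cons, ih, mem_succB]
      constructor
      · rintro ((h | h) | ⟨r', hr', h⟩)
        · exact Or.inl h
        · exact Or.inr ⟨r, List.mem_cons_self, h⟩
        · exact Or.inr ⟨r', List.mem_cons_of_mem _ hr', h⟩
      · rintro (h | ⟨r', hr', h⟩)
        · exact Or.inl (Or.inl h)
        · rcases List.mem_cons.mp hr' with rfl | hr'
          · exact Or.inl (Or.inr h)
          · exact Or.inr ⟨r', hr', h⟩

lemma mem_stepB (l x : Int) (vals : PySem.Set Int) :
    x ∈ stepB vals l ↔ ∃ r ∈ vals, SuccP l r x := by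
  unfold stepB
  rw [mem_foldl_succB]
  simp [PySem.Set.ofList, PySem.Set.empty]

lemma mem_runB_bind (x : Int) :
    ∀ (t : List Int) (S : PySem.Set Int),
      x ∈ runB S t ↔ ∃ y ∈ S, x ∈ runB (PySem.Set.ofList [y]) t := by
  intro t
  induction t with
  | nil => intro S; simp [runB, ofList_singleton]
  | cons l t ih =>
      intro S
      show x ∈ runB (stepB S l) t ↔ ∃ y ∈ S, x ∈ runB (stepB (PySem.Set.ofList [y]) l) t
      rw [ih]
      constructor
      · rintro ⟨y, hy, hx⟩
        rcases (mem_stepB l y S).mp hy with ⟨r, hr, hs⟩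
        refine ⟨r, hr, (ih _).mpr ⟨y, ?_, hx⟩⟩
        exact (mem_stepB l y _).mpr ⟨r, by simp [ofList_singleton], hs⟩
      · rintro ⟨r, hr, hx⟩
        rcases (ih _).mp hx with ⟨y, hy, hx'⟩
        rcases (mem_stepB l y _).mp hy with ⟨r', hr', hs⟩
        rw [ofList_singleton] at hr'
        rcases List.mem_singleton.mp hr' with rfl
        exact ⟨y, (mem_stepB l y S).mpr ⟨r', hr, hs⟩, hx'⟩

lemma truncdiv_eq_floordiv (a b : Int) (h : PySem.Int.mod a b = 0) (hb : b ≠ 0) :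
    PySem.Int.truncdiv a b = PySem.Int.floordiv a b := by
  have hd : b ∣ a := (PySem.Int.mod_eq_zero_iff_dvd a b).mp h
  have h2 := PySem.Int.floordiv_mul_add_mod a b
  rw [h, add_zero] at h2
  have h3 : PySem.Int.truncdiv a b = a / b := Int.tdiv_eq_ediv_of_dvd hd
  have h4 : a / b * b = a := Int.ediv_mul_cancel hd
  rw [h3]
  have h5 : (PySem.Int.floordiv a b - a / b) * b = 0 := by rw [sub_mul, h2, h4, sub_self]
  rcases mul_eq_zero.mp h5 with h6 | h6
  · omega
  · exact absurd h6 hb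

lemma checkA_one (r n0 : Int) : checkA r [n0] = (n0 == r) := by
  rw [checkA]
  simp [PySem.List.pyGetD_zero_cons]

lemma checkA_step (r n0 l : Int) (t' : List Int) :
    checkA r ((n0 :: t') ++ [l]) =
      (if checkA (r - l) (n0 :: t') then true
       else if (PySem.Int.mod r l == 0) && checkA (PySem.Int.truncdiv r l) (n0 :: t') then true
       else if PySem.Chars.endswith (PySem.Int.toChars r) (PySem.Int.toChars l) then
         match PySem.Int.ofChars? (PySem.Chars.slice (PySem.Int.toChars r) none
             (some (-(PySem.Chars.len (PySem.Int.toChars l) : Int)))) with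
         | some v => checkA v (n0 :: t')
         | none => false
       else false) := by
  rw [checkA]
  have hlen : ((n0 :: t') ++ [l]).length ≠ 1 := by simp
  rw [if_neg hlen]
  rw [show PySem.List.pyGet? ((n0 :: t') ++ [l]) (-1) = some l from
    PySem.List.pyGet?_neg_one_append_singleton _ _]
  rw [PySem.List.slice_to_neg_one, List.dropLast_concat]

lemma checkA_eq_mem_runB (t : List Int) :
    ∀ (r n0 : Int), (0 : Int) ∉ t →
      (checkA r (n0 :: t) = true ↔ n0 ∈ runB (PySem.Set.ofList [r]) t.reverse) := by
  induction t using List.reverseRecOn with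
  | nil =>
      intro r n0 _
      simp [checkA_one, runB, ofList_singleton, eq_comm (a := n0)]
  | append_singleton t' l ih =>
      intro r n0 hz
      have hl : l ≠ 0 := by
        intro h; exact hz (by simp [h])
      have hz' : (0 : Int) ∉ t' := fun h => hz (by simp [h])
      have hrev : (t' ++ [l]).reverse = l :: t'.reverse := by simp
      rw [show (n0 :: (t' ++ [l])) = ((n0 :: t') ++ [l]) from by simp, checkA_step, hrev]
      have hrun : ∀ S, runB S (l :: t'.reverse) = runB (stepB S l) t'.reverse := fun _ => rfl
      rw [hrun, mem_runB_bind]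
      have hIH : ∀ y, checkA y (n0 :: t') = true ↔ n0 ∈ runB (PySem.Set.ofList [y]) t'.reverse :=
        fun y => ih y n0 hz'
      constructor
      · intro h
        split_ifs at h with h1 h2 h3
        · exact ⟨r - l, (mem_stepB _ _ _).mpr ⟨r, by simp [ofList_singleton], Or.inl rfl⟩,
            (hIH _).mp h1⟩
        · have h2' : PySem.Int.mod r l = 0 ∧ checkA (PySem.Int.truncdiv r l) (n0 :: t') = true := by
            simpa using h2
          rcases h2' with ⟨hm', hc⟩
          refine ⟨PySem.Int.floordiv r l,
            (mem_stepB _ _ _).mpr ⟨r, by simp [ofList_singleton], Or.inr (Or.inl ⟨hl, hm', rfl⟩)⟩, ?_⟩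
          rw [truncdiv_eq_floordiv r l hm' hl] at hc
          exact (hIH _).mp hc
        · revert h
          cases ho : PySem.Int.ofChars? (PySem.Chars.slice (PySem.Int.toChars r) none
              (some (-(PySem.Chars.len (PySem.Int.toChars l) : Int)))) with
          | none => intro h; exact absurd h (by simp)
          | some v =>
              intro h
              exact ⟨v, (mem_stepB _ _ _).mpr ⟨r, by simp [ofList_singleton],
                Or.inr (Or.inr ⟨h3, ho⟩)⟩, (hIH _).mp h⟩
      · rintro ⟨y, hy, hmem⟩
        rcases (mem_stepB _ _ _).mp hy with ⟨r', hr', hs⟩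
        rw [ofList_singleton] at hr'
        rcases List.mem_singleton.mp hr' with rfl
        have hQ : checkA y (n0 :: t') = true := (hIH _).mpr hmem
        rcases hs with rfl | ⟨_, hm, rfl⟩ | ⟨he, ho⟩
        · simp [hQ]
        · rw [truncdiv_eq_floordiv r' l hm hl]
          simp [hm, hQ]
        · split_ifs with h1 h2 h3
          all_goals first
          | rfl
          | (exact absurd he h3)
          | (rw [ho]; exact hQ)

lemma checkA_eq_checkB (r : Int) (ns : List Int) (hne : ns ≠ []) (hz : (0 : Int) ∉ ns.tail) :
    checkA r ns = checkB r ns := by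
  cases ns with
  | nil => exact absurd rfl hne
  | cons n0 t =>
      have hz' : (0 : Int) ∉ t := by simpa using hz
      unfold checkB
      rw [PySem.List.slice_from_one]
      have h0 : PySem.List.pyGet? (n0 :: t) 0 = some n0 := by
        simp [PySem.List.pyGet?, PySem.List.pyIdx?]
      rw [h0]
      have hfun : (fun (vals : PySem.Set Int) (l : Int) =>
          vals.foldl (fun nxt r => succB l nxt r) (PySem.Set.ofList ([] : List Int))) = stepB := rfl
      show checkA r (n0 :: t) = PySem.Set.contains
        ((t : List Int).reverse.foldl _ (PySem.Set.ofList [r])) n0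
      rw [hfun]
      rw [Bool.eq_iff_iff, PySem.Set.contains_iff]
      exact checkA_eq_mem_runB t r n0 hz'

lemma fold_eq (m : List (Int × List Int)) :
    ∀ acc : Int, (∀ p ∈ m, p.2 ≠ [] ∧ (0 : Int) ∉ p.2.tail) →
      m.foldl (fun count line => if checkA line.1 line.2 then count + line.1 else count) acc =
      m.foldl (fun total line => if checkB line.1 line.2 then total + line.1 else total) acc := by
  induction m with
  | nil => intro acc _; rfl
  | cons p m ih =>
      intro acc hp
      have h1 := hp p (by simp)
      simp only [List.foldl_cons]
      rw [checkA_eq_checkB p.1 p.2 h1.1 h1.2]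
      exact ih _ (fun q hq => hp q (by simp [hq]))

-- ===== VERDICT (by name: the statement is the Claim_ definition above) =====
theorem part2_spec : Claim_equal_part2 := by
  intro n _ hpre
  show part2 n = part2_alt n
  exact fold_eq n 0 hpre
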